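-- pv_equiv track=rewrite | github.com/AlgosDuCouteau/Checkweigher | tab/ChangePd.py | add_newline
-- ===== SOURCE A (Python) =====
-- def add_newline(s):
--     blank_count = 0
--     result = ""
--     for char in s:
--         if char == " ":
--             blank_count += 1
--             if blank_count % 5 == 0:
--                 result += "\n"
--         result += char
--     return result
-- ===== SOURCE B (Python) =====
-- def add_newline(s):
--     parts = s.split(" ")
--     out = parts[0]
--     for i, part in enumerate(parts[1:], start=1):
--         out += ("\n " if i % 5 == 0 else " ") + part
--     return out
-- ===== Notes on version B (the rewrite author's own statement) =====
-- stated objective: faster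
-- what changed: B splits the string on single spaces and rebuilds it by joining the parts gap by gap, choosing a newline-plus-space separator for every 5th gap (1-based) and a plain space otherwise, instead of A's per-character scan with a running space counter; far fewer string concatenations (one per part instead of one per character).
import Mathlib
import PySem

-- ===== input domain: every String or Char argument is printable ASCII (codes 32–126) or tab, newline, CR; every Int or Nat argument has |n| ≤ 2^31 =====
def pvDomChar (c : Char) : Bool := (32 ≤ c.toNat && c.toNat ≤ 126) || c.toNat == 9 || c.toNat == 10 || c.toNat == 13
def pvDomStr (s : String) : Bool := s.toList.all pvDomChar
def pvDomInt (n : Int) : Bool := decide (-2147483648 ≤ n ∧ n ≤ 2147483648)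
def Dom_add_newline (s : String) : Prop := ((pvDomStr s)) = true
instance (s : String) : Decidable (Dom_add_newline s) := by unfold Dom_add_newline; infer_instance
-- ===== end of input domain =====

-- B rebuilds the string from s.split(" ") with a "\n "/" " separator per gap instead of A's
-- per-character scan with a running space counter (objective: alternative decomposition).


-- ===== PORT A =====
def add_newline (s : String) : String :=
  let st := s.toList.foldl
    (fun (st : Int × List Char) char =>
      if char == ' ' then
        -- blank_count += 1; if blank_count % 5 == 0: result += "\n"; result += char
        (st.1 + 1, (if PySem.Int.mod (st.1 + 1) 5 == 0 then st.2 ++ ['\n'] else st.2) ++ [char])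
      else (st.1, st.2 ++ [char]))
    ((0 : Int), ([] : List Char))
  String.ofList st.2

-- ===== PORT B =====
-- parts[0] never fails: split(" ") always returns a nonempty list, so headD [] is exact.
def add_newline_alt (s : String) : String :=
  let parts := PySem.Chars.splitOn s.toList [' ']
  let out := (PySem.List.enumerate (parts.drop 1) 1).foldl
    (fun acc ip =>
      acc ++ ((if PySem.Int.mod ip.1 5 == 0 then ['\n', ' '] else [' ']) ++ ip.2))
    (parts.headD [])
  String.ofList out

-- ===== PRECONDITION & SPEC =====
def Spec_add_newline (s : String) (out : String) : Prop := out = add_newline_alt s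
instance (s : String) (out : String) : Decidable (Spec_add_newline s out) := by unfold Spec_add_newline; infer_instance

-- ===== CLAIM (what is proved, stated in full; the proofs are below) =====
def Claim_equal_add_newline : Prop := ∀ (s : String), Dom_add_newline s → Spec_add_newline s (add_newline s)

-- ===== LEMMAS AND PROOFS =====

-- the separator chosen for the i-th space (1-based)
def sep5 (i : Int) : List Char := if PySem.Int.mod i 5 == 0 then ['\n', ' '] else [' ']

-- structural characterisation of split on a single space
def mySplit : List Char → List (List Char)
  | [] => [[]]
  | c :: t => if c = ' ' then [] :: mySplit t
              else match mySplit t with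
                   | [] => [[c]]   -- unreachable: mySplit is never []
                   | q :: qs => (c :: q) :: qs

def consHead (p : List Char) : List (List Char) → List (List Char)
  | [] => [p]
  | q :: qs => (p ++ q) :: qs

-- what A appends to the accumulator, given the running space count c
def fstep : List Char → Int → List Char
  | [], _ => []
  | ch :: t, c => if ch = ' ' then sep5 (c + 1) ++ fstep t (c + 1) else ch :: fstep t c

-- joining parts with sep5 separators, next separator index i
def joinSep : List (List Char) → Int → List Char
  | [], _ => []
  | [p], _ => p
  | p :: q :: ps, i => p ++ sep5 i ++ joinSep (q :: ps) (i + 1)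

-- what B's fold appends after the head part
def bflat : List (List Char) → Int → List Char
  | [], _ => []
  | p :: ps, i => sep5 i ++ p ++ bflat ps (i + 1)

theorem mySplit_ne_nil (l : List Char) : mySplit l ≠ [] := by
  cases l with
  | nil => simp [mySplit]
  | cons c t =>
    simp only [mySplit]
    split
    · simp
    · cases h : mySplit t <;> simp

theorem splitOn_go_space (fuel : Nat) (l cur : List Char) (acc : List (List Char))
    (h : l.length ≤ fuel) :
    PySem.Chars.splitOn.go [' '] fuel l cur acc = acc.reverse ++ consHead cur.reverse (mySplit l) := by
  induction fuel generalizing l cur acc with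
  | zero =>
    have : l = [] := by cases l <;> simp_all
    subst this
    simp [PySem.Chars.splitOn.go, mySplit, consHead]
  | succ n ih =>
    cases l with
    | nil => simp [PySem.Chars.splitOn.go, mySplit, consHead]
    | cons c rest =>
      simp only [PySem.Chars.splitOn.go]
      by_cases hc : c = ' '
      · subst hc
        have hpre : [' '].isPrefixOf (' ' :: rest) = true := by simp [List.isPrefixOf]
        rw [if_pos hpre]
        have := ih rest [] (cur.reverse :: acc) (by simpa using Nat.le_of_succ_le_succ h)
        rw [show List.drop [' '].length (' ' :: rest) = rest by simp]
        rw [this]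
        simp [mySplit, consHead]
        cases hs : mySplit rest with
        | nil => exact absurd hs (mySplit_ne_nil rest)
        | cons q qs => simp [consHead]
      · have hpre : [' '].isPrefixOf (c :: rest) = false := by
          simp [List.isPrefixOf]; exact fun h' => hc h'.symm
        rw [if_neg (by simp [hpre])]
        rw [ih rest (c :: cur) acc (by simpa using Nat.le_of_succ_le_succ h)]
        simp only [mySplit, if_neg hc]
        cases hs : mySplit rest with
        | nil => exact absurd hs (mySplit_ne_nil rest)
        | cons q qs => simp [consHead]
 
theorem splitOn_space (l : List Char) : PySem.Chars.splitOn l [' '] = mySplit l := by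
  unfold PySem.Chars.splitOn
  rw [splitOn_go_space (l.length + 1) l [] [] (Nat.le_succ _)]
  cases hs : mySplit l with
  | nil => exact absurd hs (mySplit_ne_nil l)
  | cons q qs => simp [consHead]

-- A's loop: the accumulator is only appended to, and the rest is fstep
theorem foldA_eq (l : List Char) (c : Int) (res : List Char) :
    (l.foldl
      (fun (st : Int × List Char) char =>
        if char == ' ' then
          (st.1 + 1, (if PySem.Int.mod (st.1 + 1) 5 == 0 then st.2 ++ ['\n'] else st.2) ++ [char])
        else (st.1, st.2 ++ [char]))
      (c, res)).2 = res ++ fstep l c := by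
  induction l generalizing c res with
  | nil => simp [fstep]
  | cons ch t ih =>
    simp only [List.foldl_cons]
    by_cases hc : ch = ' '
    · subst hc
      simp only [beq_self_eq_true, if_pos]
      rw [ih]
      simp only [fstep, if_pos rfl, sep5]
      split <;> simp
    · rw [if_neg (by simpa using hc)]
      rw [ih]
      simp [fstep, hc]

theorem fstep_eq_joinSep (l : List Char) (c : Int) :
    fstep l c = joinSep (mySplit l) (c + 1) := by
  induction l generalizing c with
  | nil => simp [fstep, mySplit, joinSep]
  | cons ch t ih =>
    by_cases hc : ch = ' '
    · subst hc
      simp only [fstep, if_pos rfl, mySplit, if_pos rfl]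
      cases hs : mySplit t with
      | nil => exact absurd hs (mySplit_ne_nil t)
      | cons q qs =>
        rw [ih, hs]
        simp [joinSep]
    · simp only [fstep, if_neg hc, mySplit, if_neg hc]
      cases hs : mySplit t with
      | nil => exact absurd hs (mySplit_ne_nil t)
      | cons q qs =>
        rw [ih, hs]
        cases qs <;> simp [joinSep]

-- B's fold over the enumerated tail
theorem foldB_eq (ps : List (List Char)) (i : Int) (acc : List Char) :
    ((PySem.List.enumerate ps i).foldl
      (fun acc ip =>
        acc ++ ((if PySem.Int.mod ip.1 5 == 0 then ['\n', ' '] else [' ']) ++ ip.2))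
      acc) = acc ++ bflat ps i := by
  induction ps generalizing i acc with
  | nil => simp [PySem.List.enumerate_nil, bflat]
  | cons p ps ih =>
    rw [PySem.List.enumerate_cons]
    simp only [List.foldl_cons]
    rw [ih]
    simp [bflat, sep5]

theorem joinSep_cons (q : List Char) (qs : List (List Char)) (i : Int) :
    joinSep (q :: qs) i = q ++ bflat qs i := by
  induction qs generalizing q i with
  | nil => simp [joinSep, bflat]
  | cons r rs ih => simp [joinSep, bflat, ih]

-- ===== VERDICT (by name: the statement is the Claim_ definition above) =====
theorem add_newline_spec : Claim_equal_add_newline := by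
  intro s _
  unfold Spec_add_newline add_newline add_newline_alt
  dsimp only
  rw [foldA_eq, foldB_eq, splitOn_space]
  cases hs : mySplit s.toList with
  | nil => exact absurd hs (mySplit_ne_nil s.toList)
  | cons q qs =>
    simp only [List.headD_cons, List.drop_one, List.tail_cons, List.nil_append]
    rw [fstep_eq_joinSep, hs, joinSep_cons]
    norm_num
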